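-- pv_equiv track=rewrite | github.com/albertvisser/filefindr | afrift/findr_files.py | reformat_result
-- ===== SOURCE A (Python) =====
-- def determine_split(content_type, words):
--     """determine word number to split on depending on content type and content
--     regular search: always 3
--     python context: different for definitions of class, function or method
--     """
--     if content_type == "py":
--         if words[3] == 'class':
--             end = 5
--             if words[5] == 'method':
--                 end = 7
--         elif words[3] == 'function':
--             end = 5
--         elif words[3:6] == ['module', 'level', 'code']:
--             end = 6
--         else:
--             end = 3
--         if words[end] in ('comment', 'docstring'):
--             end += 1
--         return end
--     # if content type is None
--     return 3
--
-- def reformat_result(lines, context_type=None):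
--     """format search results for showing as "summarized"
--
--     the lines before the first blank line do not take part in the "summarizing"
--     """
--     old_source_file = old_context = ''
--     lines_out = []
--     start_splitting = False
--     for line in lines:
--         line = line.strip()
--         if not start_splitting:
--             if line:
--                 lines_out.append(line)
--             else:
--                 start_splitting = True
--             continue
--         words = line.split()
--         source_file = words[0]
--         location = ' '.join(words[1:3])
--
--         end = determine_split(context_type, words)
--         context = ' '.join(words[3:end]) if end > 3 else ''
--
--         split_on = words[end - 1]
--         statement = line.split(split_on, 1)[1]
--         source_changed = False
--         if source_file != old_source_file:
--             source_changed = True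
--             if old_source_file:
--                 lines_out.append('')
--             old_source_file = source_file
--             lines_out.append(source_file)
--         if context and context != old_context or source_changed:
--             old_context = context
--             lines_out.append(context)
--         lines_out.append(f'{location}: {statement}')
--     return lines_out
-- ===== SOURCE B (Python) =====
-- def _split_point(content_type, words):
--     """word number to split on (same rule as the original, as one expression)"""
--     if content_type != "py":
--         return 3
--     kind = words[3]
--     if kind == 'class':
--         end = 7 if words[5] == 'method' else 5
--     elif kind == 'function':
--         end = 5
--     elif words[3:6] == ['module', 'level', 'code']:
--         end = 6
--     else:
--         end = 3
--     return end + (words[end] in ('comment', 'docstring'))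
--
--
-- def _record(content_type, line):
--     """parse one stripped result line into (source_file, location, context, statement)"""
--     words = line.split()
--     end = _split_point(content_type, words)
--     return (words[0],
--             ' '.join(words[1:3]),
--             ' '.join(words[3:end]) if end > 3 else '',
--             line.split(words[end - 1], 1)[1])
--
--
-- def _format_group(recs):
--     """render one source file's run of records; context state is local to the group"""
--     source_file, location, context, statement = recs[0]
--     out = [source_file, context, f'{location}: {statement}']
--     prev = context
--     for _, location, context, statement in recs[1:]:
--         if context and context != prev:
--             out.append(context)
--             prev = context
--         out.append(f'{location}: {statement}')
--     return out
--
--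
-- def reformat_result(lines, context_type=None):
--     """format search results as "summarized": header, then per-source-file groups
--
--     Groups of consecutive records with the same source file are formatted
--     independently (the grouping state never leaks across a file change),
--     so we group first and render each group, joining with blank lines.
--     """
--     stripped = [line.strip() for line in lines]
--     if '' not in stripped:
--         return stripped
--     blank = stripped.index('')
--     records = [_record(context_type, s) for s in stripped[blank + 1:]]
--     groups = []
--     for rec in records:
--         if groups and groups[-1][0] == rec[0]:
--             groups[-1][1].append(rec)
--         else:
--             groups.append((rec[0], [rec]))
--     out = stripped[:blank]
--     for i, (_, recs) in enumerate(groups):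
--         if i:
--             out.append('')
--         out.extend(_format_group(recs))
--     return out
-- ===== Notes on version B (the rewrite author's own statement) =====
-- stated objective: alternative
-- what changed: A's single fused loop with a start_splitting flag and cross-record grouping state is replaced by: parse the result lines into records, group consecutive records by source file, render each group independently with context state local to the group, and join the groups with blank lines after the verbatim header.
import Mathlib
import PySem

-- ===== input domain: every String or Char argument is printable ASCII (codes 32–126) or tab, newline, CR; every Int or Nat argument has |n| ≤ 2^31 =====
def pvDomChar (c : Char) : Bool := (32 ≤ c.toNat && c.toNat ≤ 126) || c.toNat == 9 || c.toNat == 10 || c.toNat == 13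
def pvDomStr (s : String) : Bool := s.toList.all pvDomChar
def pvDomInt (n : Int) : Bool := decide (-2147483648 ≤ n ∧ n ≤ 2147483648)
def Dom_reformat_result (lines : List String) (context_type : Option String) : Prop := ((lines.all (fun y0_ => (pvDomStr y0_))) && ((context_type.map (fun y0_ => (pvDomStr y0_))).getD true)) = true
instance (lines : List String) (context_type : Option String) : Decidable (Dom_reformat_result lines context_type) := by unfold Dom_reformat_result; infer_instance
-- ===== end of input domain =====

-- B replaces A's single fused loop (flag + cross-record grouping state) by: parse the records, group
-- consecutive records by source file, and render each group INDEPENDENTLY, joining groups with blank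
-- lines (the grouping state provably never leaks across a file change); objective: alternative.

-- ===== PORT A =====
-- A-side helper: determine_split (out-of-range indexing, which Python A turns into IndexError, is excluded by Pre_;
-- the port reads those indices with a default via pyGet?/getD)
def determine_split (content_type : Option String) (words : List String) : Int :=
  if content_type = some "py" then
    let end1 : Int :=
      if (PySem.List.pyGet? words 3).getD "" = "class" then
        (if (PySem.List.pyGet? words 5).getD "" = "method" then 7 else 5)
      else if (PySem.List.pyGet? words 3).getD "" = "function" then 5
      else if PySem.List.slice words (some 3) (some 6) = ["module", "level", "code"] then 6
      else 3
    if (PySem.List.pyGet? words end1).getD "" = "comment" ∨ (PySem.List.pyGet? words end1).getD "" = "docstring" then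
      end1 + 1
    else end1
  else 3

-- A's for-loop, state (old_source_file, old_context, lines_out, start_splitting)
def aloop (context_type : Option String) : List String → String → String → List String → Bool → List String
  | [], _, _, out, _ => out
  | l :: rest, osf, octx, out, ss =>
    let line := PySem.Str.strip l
    if ss = false then
      if ¬ (line = "") then aloop context_type rest osf octx (out ++ [line]) false
      else aloop context_type rest osf octx out true
    else
      let words := PySem.Str.split₀ line
      let source_file := (PySem.List.pyGet? words 0).getD ""
      let location := PySem.Str.join " " (PySem.List.slice words (some 1) (some 3))
      let e := determine_split context_type words
      let context := if e > 3 then PySem.Str.join " " (PySem.List.slice words (some 3) (some e)) else ""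
      let split_on := (PySem.List.pyGet? words (e - 1)).getD ""
      let statement := (PySem.List.pyGet? ((PySem.Str.splitMax? line split_on 1).getD []) 1).getD ""
      let source_changed := source_file ≠ osf
      let out1 := if source_changed then (if osf ≠ "" then out ++ [""] else out) ++ [source_file] else out
      let osf1 := if source_changed then source_file else osf
      let out2 := if (context ≠ "" ∧ context ≠ octx) ∨ source_changed then out1 ++ [context] else out1
      let octx1 := if (context ≠ "" ∧ context ≠ octx) ∨ source_changed then context else octx
      aloop context_type rest osf1 octx1 (out2 ++ [location ++ ": " ++ statement]) true

def reformat_result (lines : List String) (context_type : Option String) : List String :=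
  aloop context_type lines "" "" [] false

-- ===== PORT B =====
-- B-side helper: same split rule written as one expression
def splitPoint (content_type : Option String) (words : List String) : Int :=
  if content_type ≠ some "py" then 3
  else
    let kind := (PySem.List.pyGet? words 3).getD ""
    let e : Int :=
      if kind = "class" then (if (PySem.List.pyGet? words 5).getD "" = "method" then 7 else 5)
      else if kind = "function" then 5
      else if PySem.List.slice words (some 3) (some 6) = ["module", "level", "code"] then 6
      else 3
    e + (if (PySem.List.pyGet? words e).getD "" = "comment" ∨ (PySem.List.pyGet? words e).getD "" = "docstring" then 1 else 0)

-- B-side helper: parse one stripped line into (source_file, location, context, statement)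
def mkRec (content_type : Option String) (line : String) : String × String × String × String :=
  let words := PySem.Str.split₀ line
  let e := splitPoint content_type words
  ((PySem.List.pyGet? words 0).getD "",
   PySem.Str.join " " (PySem.List.slice words (some 1) (some 3)),
   if e > 3 then PySem.Str.join " " (PySem.List.slice words (some 3) (some e)) else "",
   (PySem.List.pyGet? ((PySem.Str.splitMax? line ((PySem.List.pyGet? words (e - 1)).getD "") 1).getD []) 1).getD "")

-- B's group-building loop body: 'if groups and groups[-1][0] == rec[0]: append to last else new group'
def addRec (groups : List (String × List (String × String × String × String)))
    (r : String × String × String × String) : List (String × List (String × String × String × String)) :=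
  match groups.getLast? with
  | some g => if g.1 = r.1 then groups.dropLast ++ [(g.1, g.2 ++ [r])] else groups ++ [(r.1, [r])]
  | none => [(r.1, [r])]

-- B's _format_group loop over recs[1:] with prev-context state and the out accumulator
def fgLoop : List (String × String × String × String) → String → List String → List String
  | [], _, out => out
  | (_, loc, cx, st) :: rest, prev, out =>
    fgLoop rest (if cx ≠ "" ∧ cx ≠ prev then cx else prev)
      ((if cx ≠ "" ∧ cx ≠ prev then out ++ [cx] else out) ++ [loc ++ ": " ++ st])

-- B's _format_group ([] is unreachable: groups built by addRec hold nonempty record lists; Python would raise there)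
def formatGroup (recs : List (String × String × String × String)) : List String :=
  match recs with
  | [] => []
  | (sf, loc, cx, st) :: rest => fgLoop rest cx [sf, cx, loc ++ ": " ++ st]

-- B's final loop: 'for i, (_, recs) in enumerate(groups): if i: out.append(""); out.extend(_format_group(recs))'
def joinLoop : List (String × List (String × String × String × String)) → Bool → List String → List String
  | [], _, out => out
  | g :: rest, first, out => joinLoop rest false ((if first then out else out ++ [""]) ++ formatGroup g.2)

def reformat_result_alt (lines : List String) (context_type : Option String) : List String :=
  let stripped := lines.map PySem.Str.strip
  if ¬ (stripped.contains "") then stripped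
  else
    let blank : Int := ((PySem.List.index? stripped "").getD 0 : Nat)
    let records := (PySem.List.slice stripped (some (blank + 1)) none).map (mkRec context_type)
    let groups := records.foldl addRec []
    joinLoop groups true (PySem.List.slice stripped (some 0) (some blank))

-- ===== PRECONDITION & SPEC =====
-- helpers for the precondition (independent of the ports): the stripped lines after the first blank,
-- and the word-count each of them needs so that Python A (and B) indexes in range
def tailAfterBlank : List String → List String
  | [] => []
  | s :: r => if s = "" then r else tailAfterBlank r

def preEnd (ws : List String) : Nat :=
  if ws.getD 3 "" = "class" then (if ws.getD 5 "" = "method" then 7 else 5)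
  else if ws.getD 3 "" = "function" then 5
  else if (ws.drop 3).take 3 = ["module", "level", "code"] then 6
  else 3

def recOK (context_type : Option String) (s : String) : Bool :=
  let ws := PySem.Str.split₀ s
  if context_type = some "py" then
    decide (4 ≤ ws.length) && (ws.getD 3 "" != "class" || decide (6 ≤ ws.length)) && decide (preEnd ws < ws.length)
  else decide (3 ≤ ws.length)

-- Pre_ excludes exactly the inputs where Python A raises IndexError: a result line after the first blank
-- that is blank or has too few words for the indexing done by reformat_result/determine_split.
def Pre_reformat_result (lines : List String) (context_type : Option String) : Prop :=
  ∀ s ∈ tailAfterBlank (lines.map PySem.Str.strip), recOK context_type s = true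

instance (lines : List String) (context_type : Option String) : Decidable (Pre_reformat_result lines context_type) := by
  unfold Pre_reformat_result; infer_instance

def pvWitness_reformat_result : List String × Option String :=
  (["10 matches in 2 files", "", "file1.py r. 3: x = 1", "file2.py r. 9: x = 2"], none)

def Spec_reformat_result (lines : List String) (context_type : Option String) (out : List String) : Prop := out = reformat_result_alt lines context_type
instance (lines : List String) (context_type : Option String) (out : List String) : Decidable (Spec_reformat_result lines context_type out) := by unfold Spec_reformat_result; infer_instance

-- ===== CLAIM (what is proved, stated in full; the proofs are below) =====
def Claim_equal_reformat_result : Prop := ∀ (lines : List String) (context_type : Option String), Dom_reformat_result lines context_type → Pre_reformat_result lines context_type → Spec_reformat_result lines context_type (reformat_result lines context_type)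

-- ===== LEMMAS AND PROOFS =====

-- proof-side: A's record-mode loop body as a recursion over parsed records
def formatRecs : List (String × String × String × String) → String → String → List String → List String
  | [], _, _, out => out
  | (sf, loc, cx, st) :: rest, pf, pc, out =>
    let changed := sf ≠ pf
    let out1 := if changed then (if pf ≠ "" then out ++ [""] else out) ++ [sf] else out
    let pf1 := if changed then sf else pf
    let out2 := if (cx ≠ "" ∧ cx ≠ pc) ∨ changed then out1 ++ [cx] else out1
    let pc1 := if (cx ≠ "" ∧ cx ≠ pc) ∨ changed then cx else pc
    formatRecs rest pf1 pc1 (out2 ++ [loc ++ ": " ++ st])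

-- proof-side: A's whole body, with the record loop fused to formatRecs over the parsed records
def midFn (lines : List String) (context_type : Option String) : List String :=
  let stripped := lines.map PySem.Str.strip
  if ¬ (stripped.contains "") then stripped
  else
    let blank : Int := ((PySem.List.index? stripped "").getD 0 : Nat)
    formatRecs ((PySem.List.slice stripped (some (blank + 1)) none).map (mkRec context_type)) "" ""
      (PySem.List.slice stripped (some 0) (some blank))

-- proof-side: grouping of a record list into runs of equal source file
def chunk : List (String × String × String × String) → List (String × List (String × String × String × String))
  | [] => []
  | r :: rest =>
    (r.1, r :: rest.takeWhile (fun x => x.1 = r.1)) :: chunk (rest.dropWhile (fun x => x.1 = r.1))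
termination_by l => l.length
decreasing_by
  have := List.length_dropWhile_le (fun x => x.1 = r.1) rest
  simp only [List.length_cons]
  omega

-- unfolding lemmas for chunk (defined by well-founded recursion)
lemma chunk_cons (r : String × String × String × String) (rest : List (String × String × String × String)) :
    chunk (r :: rest) =
      (r.1, r :: rest.takeWhile (fun x => x.1 = r.1)) :: chunk (rest.dropWhile (fun x => x.1 = r.1)) := by
  rw [chunk]

lemma chunk_nil : chunk [] = [] := by rw [chunk]

-- the two split-point helpers compute the same number
lemma splitPoint_eq (content_type : Option String) (words : List String) :
    splitPoint content_type words = determine_split content_type words := by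
  unfold splitPoint determine_split
  by_cases hp : content_type = some "py" <;> simp [hp]
  split_ifs <;> simp_all

-- A's loop only appends: a prefix of the accumulator passes through
lemma formatRecs_append (r : List (String × String × String × String)) :
    ∀ (pf pc : String) (o1 o2 : List String),
      formatRecs r pf pc (o1 ++ o2) = o1 ++ formatRecs r pf pc o2 := by
  induction r with
  | nil => intro pf pc o1 o2; simp [formatRecs]
  | cons hd tl ih =>
    intro pf pc o1 o2
    obtain ⟨sf, loc, cx, st⟩ := hd
    simp only [formatRecs]
    split_ifs <;> simp only [List.append_assoc] <;> rw [ih]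

-- B's group-rendering loop only appends too
lemma fgLoop_append (r : List (String × String × String × String)) :
    ∀ (p : String) (o1 o2 : List String), fgLoop r p (o1 ++ o2) = o1 ++ fgLoop r p o2 := by
  induction r with
  | nil => intro p o1 o2; simp [fgLoop]
  | cons hd tl ih =>
    intro p o1 o2
    obtain ⟨a, loc, cx, st⟩ := hd
    simp only [fgLoop]
    split_ifs <;> simp only [List.append_assoc] <;> rw [ih]

-- run the group-rendering loop from an accumulator = accumulator ++ run from []
lemma fgLoop_out (r : List (String × String × String × String)) (p : String) (o : List String) :
    fgLoop r p o = o ++ fgLoop r p [] := by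
  have := fgLoop_append r p o []
  simpa using this

-- a group renders as its head lines followed by the loop over the tail
lemma formatGroup_cons (sf loc cx st : String) (rest : List (String × String × String × String)) :
    formatGroup ((sf, loc, cx, st) :: rest) = [sf, cx, loc ++ ": " ++ st] ++ fgLoop rest cx [] := by
  simp only [formatGroup]
  rw [fgLoop_out]

-- fusion: A's loop in record mode is formatRecs over B's parsed records
lemma fuse (context_type : Option String) :
    ∀ (rest : List String) (pf pc : String) (out : List String),
      aloop context_type rest pf pc out true =
        formatRecs (rest.map (fun l => mkRec context_type (PySem.Str.strip l))) pf pc out := by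
  intro rest
  induction rest with
  | nil => intro pf pc out; simp [aloop, formatRecs]
  | cons l tl ih =>
    intro pf pc out
    simp only [aloop, List.map_cons, formatRecs, mkRec, splitPoint_eq]
    simp only [Bool.true_eq_false, if_false, ih]
    simp only [mkRec, splitPoint_eq]

-- B's group-builder foldl, started on a group list with last run (k, rs), extends that run and chunks the rest
lemma foldl_addRec (recs : List (String × String × String × String)) :
    ∀ (gs : List (String × List (String × String × String × String)))
      (k : String) (rs : List (String × String × String × String)),
      recs.foldl addRec (gs ++ [(k, rs)]) =
        gs ++ (k, rs ++ recs.takeWhile (fun x => x.1 = k)) ::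
          chunk (recs.dropWhile (fun x => x.1 = k)) := by
  induction recs with
  | nil => intro gs k rs; simp [chunk_nil]
  | cons r rest ih =>
    intro gs k rs
    by_cases h : r.1 = k
    · have h1 : addRec (gs ++ [(k, rs)]) r = gs ++ [(k, rs ++ [r])] := by
        simp [addRec, h.symm]
      simp only [List.foldl_cons, h1, ih, List.takeWhile_cons, List.dropWhile_cons, h,
        decide_true, if_true]
      simp
    · have h2 : addRec (gs ++ [(k, rs)]) r = (gs ++ [(k, rs)]) ++ [(r.1, [r])] := by
        simp [addRec]
        intro he; exact absurd he.symm h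
      have h3 := ih (gs ++ [(k, rs)]) r.1 [r]
      simp only [List.foldl_cons, h2, h3, List.takeWhile_cons, List.dropWhile_cons, h,
        decide_false, Bool.false_eq_true, if_false]
      rw [chunk_cons]
      simp

-- hence: the foldl from the empty group list computes chunk
lemma foldl_addRec_nil (recs : List (String × String × String × String)) :
    recs.foldl addRec [] = chunk recs := by
  cases recs with
  | nil => simp [chunk_nil]
  | cons r rest =>
    have h0 : addRec [] r = [(r.1, [r])] := by simp [addRec]
    have h1 := foldl_addRec rest [] r.1 [r]
    rw [List.foldl_cons, h0, chunk_cons]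
    simpa using h1

-- B's join loop, after the first group, prefixes every group with a blank line
lemma joinLoop_false (gs : List (String × List (String × String × String × String))) :
    ∀ (out : List String),
      joinLoop gs false out = out ++ (gs.map (fun g => "" :: formatGroup g.2)).flatten := by
  induction gs with
  | nil => intro out; simp [joinLoop]
  | cons g rest ih => intro out; simp [joinLoop, ih]

lemma joinLoop_true_cons (g : String × List (String × String × String × String))
    (gs : List (String × List (String × String × String × String))) (out : List String) :
    joinLoop (g :: gs) true out =
      out ++ formatGroup g.2 ++ (gs.map (fun h => "" :: formatGroup h.2)).flatten := by
  simp [joinLoop, joinLoop_false]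

-- core bridge, inside a run: from file state k ≠ "" A renders the rest of k's run, then the remaining
-- chunks, each preceded by a blank line
lemma formatRecs_chunk (recs : List (String × String × String × String)) :
    ∀ (k pc : String) (out : List String), k ≠ "" → (∀ r ∈ recs, r.1 ≠ "") →
      formatRecs recs k pc out =
        out ++ fgLoop (recs.takeWhile (fun x => x.1 = k)) pc []
            ++ ((chunk (recs.dropWhile (fun x => x.1 = k))).map (fun g => "" :: formatGroup g.2)).flatten := by
  induction recs with
  | nil => intro k pc out hk hr; simp [formatRecs, fgLoop, chunk_nil]
  | cons r rest ih =>
    intro k pc out hk hr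
    obtain ⟨sf, loc, cx, st⟩ := r
    have hsf : sf ≠ "" := hr (sf, loc, cx, st) (by simp)
    have hrest : ∀ x ∈ rest, x.1 ≠ "" := fun x hx => hr x (List.mem_cons_of_mem _ hx)
    by_cases h : sf = k
    · subst h
      by_cases hc : cx ≠ "" ∧ cx ≠ pc
      · simp only [formatRecs, ne_eq, not_true_eq_false, if_false, or_false, if_pos hc,
          List.takeWhile_cons, List.dropWhile_cons, decide_true, if_true, fgLoop]
        rw [ih _ _ _ hk hrest]
        conv_rhs => rw [fgLoop_out]
        simp
      · simp only [formatRecs, ne_eq, not_true_eq_false, if_false, or_false, if_neg hc,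
          List.takeWhile_cons, List.dropWhile_cons, decide_true, if_true, fgLoop]
        rw [ih _ _ _ hk hrest]
        conv_rhs => rw [fgLoop_out]
        simp
    · simp only [formatRecs, ne_eq, h, not_false_eq_true, if_true, or_true, hk,
        List.takeWhile_cons, List.dropWhile_cons, decide_eq_true_eq, if_neg h, if_false]
      rw [ih _ _ _ hsf hrest, chunk_cons]
      simp only [List.map_cons, List.flatten_cons, formatGroup_cons]
      simp [fgLoop]
    
-- the start: from the empty file state, A renders exactly the chunked view B joins with blanks
lemma formatRecs_start (recs : List (String × String × String × String)) (pc : String) (out : List String)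
    (hr : ∀ r ∈ recs, r.1 ≠ "") :
    formatRecs recs "" pc out = joinLoop (chunk recs) true out := by
  cases recs with
  | nil => simp [formatRecs, chunk_nil, joinLoop]
  | cons r rest =>
    obtain ⟨sf, loc, cx, st⟩ := r
    have hsf : sf ≠ "" := hr (sf, loc, cx, st) (by simp)
    have hrest : ∀ x ∈ rest, x.1 ≠ "" := fun x hx => hr x (List.mem_cons_of_mem _ hx)
    rw [chunk_cons, joinLoop_true_cons]
    simp only [formatRecs, ne_eq, hsf, not_false_eq_true, if_true, or_true, not_true_eq_false,
      if_false, formatGroup_cons]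
    rw [formatRecs_chunk rest sf cx _ hsf hrest]
    simp

-- words produced by Python's whitespace split are never empty (invariant of split₀.go's accumulator)
lemma split₀_go_ne_nil (s : List Char) :
    ∀ (cur : List Char) (acc : List (List Char)), (∀ w ∈ acc, w ≠ []) →
      ∀ w ∈ PySem.Chars.split₀.go s cur acc, w ≠ [] := by
  induction s with
  | nil =>
    intro cur acc hacc w hw
    by_cases hc : cur.isEmpty
    · simp only [PySem.Chars.split₀.go, hc, if_true] at hw
      exact hacc _ (List.mem_reverse.mp hw)
    · simp only [PySem.Chars.split₀.go, hc, if_false] at hw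
      rcases List.mem_cons.mp (List.mem_reverse.mp hw) with h | h
      · subst h
        simp [List.isEmpty_iff] at hc
        simpa using hc
      · exact hacc _ h
  | cons c rest ih =>
    intro cur acc hacc w hw
    by_cases hs : PySem.Chars.isspace c
    · by_cases hc : cur.isEmpty
      · simp only [PySem.Chars.split₀.go, hs, hc, if_true] at hw
        exact ih [] acc hacc w hw
      · simp only [PySem.Chars.split₀.go, hs, hc, if_true, if_false] at hw
        refine ih [] (cur.reverse :: acc) ?_ w hw
        intro x hx
        rcases List.mem_cons.mp hx with h | h
        · subst h
          simp_all [List.isEmpty_iff]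
        · exact hacc _ h
    · simp only [PySem.Chars.split₀.go, hs] at hw
      exact ih (c :: cur) acc hacc w hw

lemma split₀_words_ne (s : String) (w : String) (hw : w ∈ PySem.Str.split₀ s) : w ≠ "" := by
  simp only [PySem.Str.split₀, List.mem_map] at hw
  obtain ⟨l, hl, rfl⟩ := hw
  have hne : l ≠ [] :=
    split₀_go_ne_nil s.toList [] [] (by simp) l (by simpa [PySem.Chars.split₀] using hl)
  intro h
  apply hne
  have := congrArg String.toList h
  simpa using this

-- first word of an admitted record line is a nonempty source file
lemma recOK_sf_ne (context_type : Option String) (s : String) (h : recOK context_type s = true) :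
    (mkRec context_type s).1 ≠ "" := by
  have hlen : 3 ≤ (PySem.Str.split₀ s).length := by
    unfold recOK at h
    by_cases hp : context_type = some "py" <;> simp [hp] at h <;> omega
  obtain ⟨w, ws, hw⟩ : ∃ w ws, PySem.Str.split₀ s = w :: ws := by
    cases hsp : PySem.Str.split₀ s with
    | nil => rw [hsp] at hlen; simp at hlen
    | cons a b => exact ⟨a, b, rfl⟩
  have hne := split₀_words_ne s w (by rw [hw]; simp)
  simpa [mkRec, hw, pysem] using hne

-- tailAfterBlank is the drop past the first blank element
lemma tailAfterBlank_drop (l : List String) :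
    ∀ i, PySem.List.index? l "" = some i → tailAfterBlank l = l.drop (i + 1) := by
  induction l with
  | nil => intro i h; simp [PySem.List.index?_eq_idxOf?] at h
  | cons x xs ih =>
    intro i h
    by_cases hx : x = ""
    · subst hx
      rw [PySem.List.index?_cons_self] at h
      cases h
      simp [tailAfterBlank]
    · rw [PySem.List.index?_cons_of_ne xs hx] at h
      rcases Option.map_eq_some_iff.mp h with ⟨j, hj, rfl⟩
      simp only [tailAfterBlank, hx, if_false, List.drop_succ_cons]
      exact ih j hj

-- A's header phase followed by the fused record phase is midFn
lemma midFn_nil (context_type : Option String) : midFn [] context_type = [] := by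
  simp [midFn]

lemma midFn_cons_blank (context_type : Option String) (l : String) (rest : List String)
    (h : PySem.Str.strip l = "") :
    midFn (l :: rest) context_type =
      formatRecs (rest.map (fun x => mkRec context_type (PySem.Str.strip x))) "" "" [] := by
  simp [midFn, h, PySem.List.slice_from_one, pysem, Function.comp_def]

lemma midFn_cons_ne (context_type : Option String) (l : String) (rest : List String)
    (h : ¬ PySem.Str.strip l = "") :
    midFn (l :: rest) context_type =
      PySem.Str.strip l :: midFn rest context_type := by
  by_cases hc : (rest.map PySem.Str.strip).contains ""
  · rcases Option.isSome_iff_exists.mp ((PySem.List.index?_isSome_iff (rest.map PySem.Str.strip) "").mpr (by simpa using hc)) with ⟨i, hi⟩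
    have hix : PySem.List.index? (PySem.Str.strip l :: rest.map PySem.Str.strip) "" = some (i + 1) := by
      rw [PySem.List.index?_cons_of_ne (rest.map PySem.Str.strip) h, hi]; rfl
    simp only [midFn, List.map_cons, List.contains_cons, hc, Bool.or_true,
      not_true_eq_false, if_false, hix, hi, Option.getD_some]
    have h2 : (((i + 1 : Nat) : Int) + 1 : Int) = (((i + 2 : Nat) : Int)) := by push_cast; ring
    have h3 : (((i : Nat) : Int) + 1 : Int) = (((i + 1 : Nat) : Int)) := by push_cast; ring
    rw [h2, PySem.List.slice_from_natCast, h3, PySem.List.slice_from_natCast]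
    rw [PySem.List.slice_zero_start, PySem.List.slice_zero_start,
      PySem.List.slice_to_natCast, PySem.List.slice_to_natCast]
    simp only [List.drop_succ_cons, List.take_succ_cons,
      show i + 2 = i + 1 + 1 from rfl]
    rw [show PySem.Str.strip l :: (rest.map PySem.Str.strip).take i =
          [PySem.Str.strip l] ++ (rest.map PySem.Str.strip).take i from rfl,
      formatRecs_append]
    rfl
  · have hall : ∀ x ∈ rest, ¬ PySem.Str.strip x = "" := by simpa using hc
    simp [midFn, h]
    rw [if_pos hall, if_pos hall]

lemma aloop_main (context_type : Option String) :
    ∀ (lines : List String) (out : List String),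
      aloop context_type lines "" "" out false = out ++ midFn lines context_type := by
  intro lines
  induction lines with
  | nil => intro out; simp [aloop, midFn_nil]
  | cons l rest ih =>
    intro out
    by_cases h : PySem.Str.strip l = ""
    · simp only [aloop, h, not_true_eq_false, if_false, if_true]
      rw [fuse, midFn_cons_blank context_type l rest h,
        show out = out ++ ([] : List String) by simp, formatRecs_append]
      simp
    · simp only [aloop, h, not_false_eq_true, if_true]
      rw [ih, midFn_cons_ne context_type l rest h]
      simp

-- midFn equals B's port on every admitted input
lemma midFn_eq_alt (lines : List String) (context_type : Option String)
    (hpre : Pre_reformat_result lines context_type) :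
    midFn lines context_type = reformat_result_alt lines context_type := by
  by_cases hc : (lines.map PySem.Str.strip).contains ""
  · rcases Option.isSome_iff_exists.mp ((PySem.List.index?_isSome_iff (lines.map PySem.Str.strip) "").mpr (by simpa using hc)) with ⟨i, hi⟩
    have htail := tailAfterBlank_drop (lines.map PySem.Str.strip) i hi
    have h3 : (((i : Nat) : Int) + 1 : Int) = (((i + 1 : Nat) : Int)) := by push_cast; ring
    have hkeys : ∀ r ∈ ((lines.map PySem.Str.strip).drop (i + 1)).map (mkRec context_type), r.1 ≠ "" := by
      intro r hr
      rcases List.mem_map.mp hr with ⟨t, ht, rfl⟩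
      exact recOK_sf_ne context_type t (hpre t (by rw [htail]; exact ht))
    simp only [midFn, reformat_result_alt, hc, not_true_eq_false, if_false, hi, Option.getD_some,
      h3, PySem.List.slice_from_natCast]
    rw [formatRecs_start _ _ _ hkeys, foldl_addRec_nil]
  · simp only [midFn, reformat_result_alt]
    rw [if_pos hc, if_pos hc]

theorem reformat_result_spec : Claim_equal_reformat_result := by
  intro lines context_type _ hpre
  unfold Spec_reformat_result reformat_result
  rw [aloop_main, midFn_eq_alt lines context_type hpre]
  simp
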